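-- pv_equiv track=rewrite | github.com/mohamadysn/Documentation_detectCOs | code/scripts/detectCOs_EMS/detectCOs_sliding_window_EMS.py | create_window_output
-- ===== SOURCE A (Python) =====
-- def create_window_output(snps, chr, window_index):
--     ADref_sum = sum(snp[1] for snp in snps)
--     ADalt_sum = sum(snp[2] for snp in snps)
--     DP_sum = ADref_sum + ADalt_sum
--     return [
--         snps[0][0],  # start_pos
--         snps[-1][0],  # stop_pos
--         ADref_sum,
--         ADalt_sum,
--         DP_sum,
--         sum("0" in snp[3] for snp in snps),  # nbSNP_Aref
--         sum("1" in snp[3] for snp in snps),  # nbSNP_Aalt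
--         len(snps)  # count of SNPs
--     ]
-- ===== SOURCE B (Python) =====
-- def create_window_output(snps, chr, window_index):
--     # Divide-and-conquer: aggregate (ADref, ADalt, nb0, nb1) monoidally over halves.
--     def agg(chunk):
--         if len(chunk) == 1:
--             _, adref, adalt, geno = chunk[0]
--             return (adref, adalt, int("0" in geno), int("1" in geno))
--         mid = len(chunk) // 2
--         left = agg(chunk[:mid])
--         right = agg(chunk[mid:])
--         return tuple(x + y for x, y in zip(left, right))
--
--     start = snps[0][0]
--     stop = snps[-1][0]
--     adref, adalt, n0, n1 = agg(snps)
--     return [start, stop, adref, adalt, adref + adalt, n0, n1, len(snps)]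
-- ===== Notes on version B (the rewrite author's own statement) =====
-- stated objective: alternative
-- what changed: Replaces A's four separate linear generator-expression scans with a recursive divide-and-conquer aggregation that splits the window in half and combines partial (ADref, ADalt, nb0, nb1) tuples monoidally; correct because all four aggregates are sums, which are associative.
-- outside the precondition, e.g. on create_window_output([], 'chr1', 0): A raises IndexError, B raises IndexError
import Mathlib
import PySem

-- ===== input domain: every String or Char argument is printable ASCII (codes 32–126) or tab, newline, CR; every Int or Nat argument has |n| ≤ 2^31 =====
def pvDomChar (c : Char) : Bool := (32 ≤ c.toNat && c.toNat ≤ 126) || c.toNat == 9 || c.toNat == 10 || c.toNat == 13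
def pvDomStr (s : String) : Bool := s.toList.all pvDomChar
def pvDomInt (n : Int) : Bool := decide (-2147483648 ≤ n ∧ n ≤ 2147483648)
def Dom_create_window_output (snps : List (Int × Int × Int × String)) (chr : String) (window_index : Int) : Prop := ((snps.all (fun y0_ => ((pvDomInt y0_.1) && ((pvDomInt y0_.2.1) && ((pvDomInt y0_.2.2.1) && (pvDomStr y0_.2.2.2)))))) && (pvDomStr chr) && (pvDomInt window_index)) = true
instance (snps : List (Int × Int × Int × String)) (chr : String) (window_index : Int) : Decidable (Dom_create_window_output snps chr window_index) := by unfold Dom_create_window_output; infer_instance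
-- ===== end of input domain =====

-- B replaces A's four separate linear scans with a recursive divide-and-conquer aggregation combining per-half partial sums (alternative decomposition; not faster).


-- ===== PORT A =====
def create_window_output (snps : List (Int × Int × Int × String)) (chr : String) (window_index : Int) : List Int :=
  let ADref_sum := (snps.map (fun snp => snp.2.1)).sum
  let ADalt_sum := (snps.map (fun snp => snp.2.2.1)).sum
  let DP_sum := ADref_sum + ADalt_sum
  match PySem.List.pyGet? snps 0, PySem.List.pyGet? snps (-1) with
  | some first, some last =>
      [first.1, last.1, ADref_sum, ADalt_sum, DP_sum,
       (snps.map (fun snp => if PySem.Str.isIn "0" snp.2.2.2 then (1 : Int) else 0)).sum,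
       (snps.map (fun snp => if PySem.Str.isIn "1" snp.2.2.2 then (1 : Int) else 0)).sum,
       (snps.length : Int)]
  | _, _ => []  -- snps = []: Python raises IndexError; excluded by Pre_

-- ===== PORT B =====  (divide-and-conquer aggregation, following Source B's agg)
-- agg is only ever called on nonempty chunks in Python (it would not terminate on []);
-- the [] branch here is the unreachable totalization. chunk[:mid]/chunk[mid:] with
-- 0 ≤ mid ≤ len are exactly take/drop.
def pvAgg : List (Int × Int × Int × String) → Int × Int × Int × Int
  | [] => (0, 0, 0, 0)
  | [s] => (s.2.1, s.2.2.1,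
            (if PySem.Str.isIn "0" s.2.2.2 then (1 : Int) else 0),
            (if PySem.Str.isIn "1" s.2.2.2 then (1 : Int) else 0))
  | a :: b :: rest =>
    let chunk := a :: b :: rest
    let mid := chunk.length / 2
    let L := pvAgg (chunk.take mid)
    let R := pvAgg (chunk.drop mid)
    (L.1 + R.1, L.2.1 + R.2.1, L.2.2.1 + R.2.2.1, L.2.2.2 + R.2.2.2)
termination_by chunk => chunk.length
decreasing_by
  · simp; omega
  · simp; omega

def create_window_output_alt (snps : List (Int × Int × Int × String)) (chr : String) (window_index : Int) : List Int :=
  match snps with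
  | [] => []  -- snps = []: IndexError in Python (snps[0]); excluded by Pre_
  | first :: _ =>
      let last := PySem.List.pyGetD snps (-1) first  -- snps[-1], in range since snps ≠ []
      let r := pvAgg snps
      [first.1, last.1, r.1, r.2.1, r.1 + r.2.1, r.2.2.1, r.2.2.2, (snps.length : Int)]

-- ===== PRECONDITION & SPEC =====
-- Pre_ excludes only the empty list, on which Python A raises IndexError (snps[0]).
def Pre_create_window_output (snps : List (Int × Int × Int × String)) (chr : String) (window_index : Int) : Prop := snps ≠ []
instance (snps : List (Int × Int × Int × String)) (chr : String) (window_index : Int) : Decidable (Pre_create_window_output snps chr window_index) := by unfold Pre_create_window_output; infer_instance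
def pvWitness_create_window_output : (List (Int × Int × Int × String)) × String × Int := ([(10, 2, 3, "0/1"), (20, 1, 0, "1|1")], "chr1", 0)
def Spec_create_window_output (snps : List (Int × Int × Int × String)) (chr : String) (window_index : Int) (out : List Int) : Prop := out = create_window_output_alt snps chr window_index
instance (snps : List (Int × Int × Int × String)) (chr : String) (window_index : Int) (out : List Int) : Decidable (Spec_create_window_output snps chr window_index out) := by unfold Spec_create_window_output; infer_instance

-- ===== CLAIM =====
def Claim_equal_create_window_output : Prop := ∀ (snps : List (Int × Int × Int × String)) (chr : String) (window_index : Int), Dom_create_window_output snps chr window_index → Pre_create_window_output snps chr window_index → Spec_create_window_output snps chr window_index (create_window_output snps chr window_index)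

-- ===== LEMMAS AND PROOFS =====
theorem pvAgg_eq (l : List (Int × Int × Int × String)) :
    pvAgg l = ((l.map (fun snp => snp.2.1)).sum,
               (l.map (fun snp => snp.2.2.1)).sum,
               (l.map (fun snp => if PySem.Str.isIn "0" snp.2.2.2 then (1 : Int) else 0)).sum,
               (l.map (fun snp => if PySem.Str.isIn "1" snp.2.2.2 then (1 : Int) else 0)).sum) := by
  induction l using pvAgg.induct with
  | case1 => simp [pvAgg]
  | case2 s => simp [pvAgg]
  | case3 a b rest _ _ ihL ihR =>
    rw [pvAgg]
    rw [ihL, ihR]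
    have h := (List.take_append_drop ((a :: b :: rest).length / 2) (a :: b :: rest)).symm
    conv_rhs => rw [h]
    simp only [List.map_append, List.sum_append]
    rfl

-- ===== VERDICT =====
theorem create_window_output_spec : Claim_equal_create_window_output := by
  intro snps chr wi _ hpre
  unfold Spec_create_window_output create_window_output create_window_output_alt
  match snps, hpre with
  | first :: rest, _ =>
    rw [pvAgg_eq]
    simp only [PySem.List.pyGet?_zero_cons, PySem.List.pyGet?_neg_one,
      List.getLast?_eq_some_getLast (l := first :: rest) (by simp),
      PySem.List.pyGetD_neg_one (xs := first :: rest) (h := by simp)]
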